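-- pv_equiv track=rewrite | github.com/Leaveson/programmers_daily | 2023-01/0116.py | solution
-- ===== SOURCE A (Python) =====
-- from collections import defaultdict
--
-- def solution(id_list, report, k):
--     # answer = []
--     id_score_dict = {user_id : defaultdict(int) for user_id in id_list}
--     reported_score = {user_id : 0 for user_id in id_list}
--     message_count = {user_id : 0 for user_id in id_list}
--     reported_to_report = defaultdict(set)
--
--     for alarm in report:
--         user_id, reported_id = alarm.split(' ')
--         id_score_dict[user_id][reported_id] += 1
--
--         reported_to_report[reported_id].add(user_id)
--
--         if id_score_dict[user_id][reported_id] >=2: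
--             continue
--         else:
--             reported_score[reported_id] += 1
--
--     for key, value in reported_score.items():
--         if value >= k:
--             for user_id in reported_to_report[key]:
--                 message_count[user_id] += 1
--     answer = [answer for answer in message_count.values()]
--     return answer
-- ===== SOURCE B (Python) =====
-- def solution(id_list, report, k):
--     # Brute force over integer positions in the (order-preserving) deduplicated
--     # id list: no counting dicts at all, every question is answered by membership
--     # of an index pair in the split report list.
--     ids = list(dict.fromkeys(id_list))
--     pairs = []
--     for r in report:
--         u, v = r.split(' ')
--         pairs.append((ids.index(u), ids.index(v)))
--     n = len(ids)
--     over = [j for j in range(n) if sum((i, j) in pairs for i in range(n)) >= k]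
--     return [sum((i, j) in pairs for j in over) for i in range(n)]
-- ===== Notes on version B (the rewrite author's own statement) =====
-- stated objective: alternative
-- what changed: A makes one mutating pass over report maintaining four dicts (nested pair counts, running distinct-reporter scores, reporter sets) plus a second nested dict loop; B keeps no counting state at all and instead brute-forces the cross product of positions in the deduplicated id list, deciding each question by membership of an index pair in the split report list.
import Mathlib
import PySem

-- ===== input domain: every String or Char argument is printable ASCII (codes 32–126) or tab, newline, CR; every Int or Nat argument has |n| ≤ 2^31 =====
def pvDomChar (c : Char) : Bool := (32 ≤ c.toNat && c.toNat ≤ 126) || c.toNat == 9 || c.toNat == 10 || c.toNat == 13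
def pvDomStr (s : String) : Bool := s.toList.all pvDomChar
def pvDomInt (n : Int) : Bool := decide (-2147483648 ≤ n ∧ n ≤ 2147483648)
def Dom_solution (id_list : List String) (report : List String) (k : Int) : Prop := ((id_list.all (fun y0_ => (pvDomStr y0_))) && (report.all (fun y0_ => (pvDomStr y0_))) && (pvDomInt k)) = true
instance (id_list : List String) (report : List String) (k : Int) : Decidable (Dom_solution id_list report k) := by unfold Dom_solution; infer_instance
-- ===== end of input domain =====

-- B keeps no counting state at all: instead of A's pass over report with four mutating
-- dicts it brute-forces the cross product of positions in the deduplicated id list,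
-- answering each question by membership of an index pair in the split report list
-- (alternative decomposition, not faster).

-- ===== PORT A =====
-- shared primitive: r.split(' '); the separator " " is non-empty, so split? is always `some`
def pvSplit (r : String) : List String := (PySem.Str.split? r " ").getD []

abbrev StA := PySem.Dict String (PySem.Dict String Int) × PySem.Dict String Int × PySem.Dict String (PySem.Set String)

-- body of A's `for alarm in report` loop.  Python raises ValueError (bad unpack) or
-- KeyError (id not in id_list) on inputs excluded by Pre_solution; there the `| _ =>`
-- branch and the getD/modify defaults are unreachable/irrelevant, inside Pre_ they are exact.
def stepA (st : StA) (alarm : String) : StA :=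
  match pvSplit alarm with
  | [user_id, reported_id] =>
      let inner := (st.1.getD user_id PySem.Dict.empty).modify reported_id 0 (· + 1)
      let isd := st.1.insert user_id inner
      let rtr := st.2.2.modify reported_id PySem.Set.empty (fun s => s.add user_id)
      let rsc := if 2 ≤ inner.getD reported_id 0 then st.2.1
                 else st.2.1.modify reported_id 0 (· + 1)
      (isd, rsc, rtr)
  | _ => st

-- body of A's `for key, value in reported_score.items()` loop (the inner `for` over the
-- set reported_to_report[key]; its Python iteration order is hash order, but the final
-- counts do not depend on it)
def stepN (k : Int) (rtr : PySem.Dict String (PySem.Set String)) (mc : PySem.Dict String Int) (kv : String × Int) : PySem.Dict String Int :=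
  if k ≤ kv.2 then (rtr.getD kv.1 PySem.Set.empty).foldl (fun mc u => mc.modify u 0 (· + 1)) mc else mc

def solution (id_list : List String) (report : List String) (k : Int) : List Int :=
  let id_score_dict := id_list.foldl (fun d u => d.insert u (PySem.Dict.empty : PySem.Dict String Int)) PySem.Dict.empty
  let reported_score := id_list.foldl (fun d u => d.insert u (0 : Int)) PySem.Dict.empty
  let message_count := id_list.foldl (fun d u => d.insert u (0 : Int)) PySem.Dict.empty
  let st := report.foldl stepA (id_score_dict, reported_score, PySem.Dict.empty)
  let mc := st.2.1.items.foldl (stepN k st.2.2) message_count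
  mc.values

-- ===== PORT B =====
-- body of B's `for r in report` loop: `u, v = r.split(' ')` raises ValueError and
-- `ids.index` raises ValueError outside Pre_solution; there the getD defaults are
-- unreachable/irrelevant, inside Pre_ they are exact.
def pairF (ids : List String) (r : String) : Nat × Nat :=
  ((PySem.List.index? ids ((pvSplit r).getD 0 "")).getD 0,
   (PySem.List.index? ids ((pvSplit r).getD 1 "")).getD 0)

-- `ids` = dict.fromkeys dedup; range(n) ports as List.range; a sum of booleans as countP
def solution_alt (id_list : List String) (report : List String) (k : Int) : List Int :=
  let ids := PySem.List.dedup id_list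
  let pairs := report.map (pairF ids)
  let n := ids.length
  let suspended := (List.range n).filter (fun j =>
    decide (k ≤ (((List.range n).countP (fun i => pairs.contains (i, j))) : Int)))
  (List.range n).map (fun i => ((suspended.countP (fun j => pairs.contains (i, j))) : Int))

-- ===== PRECONDITION & SPEC =====
-- Pre_ excludes exactly the inputs where A raises: a report entry that does not split into
-- two parts (ValueError on unpack) or mentions an id missing from id_list (KeyError).
def Pre_solution (id_list : List String) (report : List String) (k : Int) : Prop :=
  ∀ r ∈ report, (pvSplit r).length = 2 ∧ ∀ x ∈ pvSplit r, x ∈ id_list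
instance (id_list : List String) (report : List String) (k : Int) : Decidable (Pre_solution id_list report k) := by unfold Pre_solution; infer_instance

def pvWitness_solution : List String × List String × Int :=
  (["muzi", "frodo", "apeach", "neo"],
   ["muzi frodo", "apeach frodo", "frodo neo", "muzi neo", "apeach muzi"], 2)

def Spec_solution (id_list : List String) (report : List String) (k : Int) (out : List Int) : Prop := out = solution_alt id_list report k
instance (id_list : List String) (report : List String) (k : Int) (out : List Int) : Decidable (Spec_solution id_list report k out) := by unfold Spec_solution; infer_instance

-- ===== CLAIM (what is proved, stated in full; the proofs are below) =====
def Claim_equal_solution : Prop := ∀ (id_list : List String) (report : List String) (k : Int), Dom_solution id_list report k → Pre_solution id_list report k → Spec_solution id_list report k (solution id_list report k)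


-- ===== LEMMAS AND PROOFS =====

-- number of distinct report pairs that accuse v
def scr (report : List String) (v : String) : Nat :=
  (PySem.Set.ofList (report.map pvSplit)).countP (fun q => q.getD 1 "" == v)

def Shape (id_list : List String) (r : String) : Prop :=
  ∃ u v, pvSplit r = [u, v] ∧ u ∈ id_list ∧ v ∈ id_list

def InvA (id_list : List String) (done : List String) (st : StA) : Prop :=
  (∀ u v, (st.1.getD u PySem.Dict.empty).getD v 0 = ((done.map pvSplit).count [u, v] : Int)) ∧
  (∀ v, st.2.1.getD v 0 = (scr done v : Int)) ∧
  st.2.1.keys = PySem.List.dedup id_list ∧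
  (∀ v, (st.2.2.getD v PySem.Set.empty).Nodup ∧
    ∀ u, u ∈ st.2.2.getD v PySem.Set.empty ↔ [u, v] ∈ done.map pvSplit)

lemma pre_shape {id_list report : List String} {k : Int}
    (h : Pre_solution id_list report k) : ∀ r ∈ report, Shape id_list r := by
  intro r hr
  obtain ⟨hlen, hmem⟩ := h r hr
  obtain ⟨u, v, huv⟩ := List.length_eq_two.mp hlen
  exact ⟨u, v, huv, hmem u (by simp [huv]), hmem v (by simp [huv])⟩

lemma getD_foldl_insert_const {ν : Type} (l : List String) (c : ν)
    (d : PySem.Dict String ν) (h : ∀ x, d.getD x c = c) :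
    ∀ x, (l.foldl (fun d u => d.insert u c) d).getD x c = c := by
  induction l generalizing d with
  | nil => exact h
  | cons a t ih =>
      intro x
      exact ih _ (fun y => by rw [PySem.Dict.getD_insert]; split <;> simp [h]) x

lemma keys_foldl_insert_const {ν : Type} (l : List String) (c : ν) :
    ((l.foldl (fun d u => d.insert u c) PySem.Dict.empty).keys) = PySem.List.dedup l := by
  have := PySem.Dict.keys_foldl_insert (ν := ν) l (fun _ _ => c) PySem.Dict.empty
  simpa [PySem.Dict.keys_empty, PySem.Set.update_empty] using this
lemma stepA_inv {id_list done : List String} {st : StA} {r : String}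
    (hs : Shape id_list r) (h : InvA id_list done st) :
    InvA id_list (done ++ [r]) (stepA st r) := by
  obtain ⟨u, v, hr, hu, hv⟩ := hs
  obtain ⟨h1, h2, h3, h4⟩ := h
  have hL : (done ++ [r]).map pvSplit = done.map pvSplit ++ [[u, v]] := by simp [hr]
  have hcnt : ((st.1.getD u PySem.Dict.empty).modify v 0 (· + 1)).getD v 0
      = ((done.map pvSplit).count [u, v] : Int) + 1 := by
    rw [PySem.Dict.getD_modify]; simp [h1 u v]
  have hmem2 : (2 ≤ ((st.1.getD u PySem.Dict.empty).modify v 0 (· + 1)).getD v 0)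
      ↔ [u, v] ∈ done.map pvSplit := by
    rw [hcnt]
    constructor
    · intro hh
      have h0 : 0 < (done.map pvSplit).count [u, v] := by omega
      exact List.count_pos_iff.mp h0
    · intro hh
      have h0 : 0 < (done.map pvSplit).count [u, v] := List.count_pos_iff.mpr hh
      omega
  simp only [stepA, hr]
  refine ⟨?_, ?_, ?_, ?_⟩
  · intro u' v'
    rw [hL, PySem.Dict.getD_insert]
    by_cases hu' : u' = u
    · subst hu'
      rw [if_pos rfl, PySem.Dict.getD_modify]
      by_cases hv' : v' = v
      · subst hv'
        rw [if_pos rfl, h1 u' v']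
        simp [List.count_append]
      · rw [if_neg hv', h1 u' v']
        have hne : [u', v] ≠ [u', v'] := by simp; exact fun hh => hv' hh.symm
        simp [List.count_append, hne]
    · rw [if_neg hu', h1 u' v']
      have hne : [u, v] ≠ [u', v'] := by simp; exact fun hh _ => hu' hh.symm
      simp [List.count_append, hne]
  · intro v'
    by_cases hm : [u, v] ∈ done.map pvSplit
    · rw [if_pos (hmem2.mpr hm)]
      have hset : PySem.Set.ofList ((done ++ [r]).map pvSplit)
          = PySem.Set.ofList (done.map pvSplit) := by
        rw [hL, PySem.Set.ofList_append_singleton,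
            PySem.Set.add_of_mem ((PySem.Set.mem_ofList _ _).mpr hm)]
      rw [h2 v']; unfold scr; rw [hset]
    · rw [if_neg (fun hh => hm (hmem2.mp hh)), PySem.Dict.getD_modify]
      have hset : PySem.Set.ofList ((done ++ [r]).map pvSplit)
          = PySem.Set.ofList (done.map pvSplit) ++ [[u, v]] := by
        rw [hL, PySem.Set.ofList_append_singleton,
            PySem.Set.add_of_not_mem (fun hh => hm ((PySem.Set.mem_ofList _ _).mp hh))]
      unfold scr
      rw [hset, List.countP_append]
      by_cases hv' : v' = v
      · subst hv'
        rw [if_pos rfl, h2 v']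
        simp [scr]
      · rw [if_neg hv', h2 v']
        have hb : (([u, v].getD 1 "" == v') = false) := by
          simp; exact fun hh => hv' hh.symm
        simp [scr, List.countP_cons]
        exact fun hh => hv' hh.symm
  · by_cases hm : 2 ≤ ((st.1.getD u PySem.Dict.empty).modify v 0 (· + 1)).getD v 0
    · rw [if_pos hm]; exact h3
    · rw [if_neg hm]
      rw [PySem.Dict.keys_modify, PySem.Dict.keys_insert_of_contains, h3]
      rw [PySem.Dict.contains_iff_mem_keys, h3]
      exact (PySem.List.mem_dedup _ _).mpr hv
  · intro v'
    rw [PySem.Dict.getD_modify, hL]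
    by_cases hv' : v' = v
    · subst hv'
      rw [if_pos rfl]
      refine ⟨PySem.Set.nodup_add _ _ (h4 _).1, ?_⟩
      intro u'
      rw [PySem.Set.mem_add, (h4 _).2 u']
      constructor
      · rintro (hh | rfl)
        · exact List.mem_append_left _ hh
        · simp
      · intro hh
        rcases List.mem_append.mp hh with hh | hh
        · exact Or.inl hh
        · simp at hh; exact Or.inr hh
    · rw [if_neg hv']
      refine ⟨(h4 v').1, ?_⟩
      intro u'
      rw [(h4 v').2 u']
      constructor
      · exact fun hh => List.mem_append_left _ hh
      · intro hh
        rcases List.mem_append.mp hh with hh | hh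
        · exact hh
        · simp at hh; exact absurd hh.2 hv'

lemma loopN_getD (k : Int) (rtr : PySem.Dict String (PySem.Set String)) :
    ∀ (items : List (String × Int)) (mc : PySem.Dict String Int) (u : String),
    (items.foldl (stepN k rtr) mc).getD u 0 =
      mc.getD u 0 + ((items.filter (fun kv => decide (k ≤ kv.2))).map
        (fun kv => (((rtr.getD kv.1 PySem.Set.empty).count u : Nat) : Int))).sum := by
  intro items
  induction items with
  | nil => simp
  | cons kv t ih =>
      intro mc u
      rw [List.foldl_cons, ih]
      unfold stepN
      by_cases hk : k ≤ kv.2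
      · rw [if_pos hk, PySem.Dict.getD_foldl_modify_add_one]
        simp [hk]
        ring
      · rw [if_neg hk]
        simp [hk]

lemma set_update_self {α : Type} [BEq α] [LawfulBEq α] (s : PySem.Set α) (xs : List α)
    (h : ∀ x ∈ xs, x ∈ s) : PySem.Set.update s xs = s := by
  rw [PySem.Set.update_eq_append_filter]
  have hnil : (PySem.Set.ofList xs).filter (fun y => !(PySem.Set.contains s y)) = [] := by
    apply List.filter_eq_nil_iff.mpr
    intro a ha
    have hc : s.contains a = true := (PySem.Set.contains_iff s a).mpr (h a ((PySem.Set.mem_ofList _ _).mp ha))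
    simp only [hc]
    exact fun hh => by cases hh
  rw [hnil, List.append_nil]

lemma loopN_keys (k : Int) (rtr : PySem.Dict String (PySem.Set String)) :
    ∀ (items : List (String × Int)) (mc : PySem.Dict String Int),
    (∀ kv ∈ items, ∀ u ∈ rtr.getD kv.1 PySem.Set.empty, u ∈ mc.keys) →
    (items.foldl (stepN k rtr) mc).keys = mc.keys := by
  intro items
  induction items with
  | nil => intro mc _; rfl
  | cons kv t ih =>
      intro mc h
      rw [List.foldl_cons]
      have hstep : (stepN k rtr mc kv).keys = mc.keys := by
        unfold stepN
        by_cases hk : k ≤ kv.2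
        · rw [if_pos hk]
          rw [PySem.Dict.keys_foldl_modify (rtr.getD kv.1 PySem.Set.empty) 0
              (fun _ _ y => y + 1) mc]
          exact set_update_self _ _ (fun x hx => h kv (by simp) x hx)
        · rw [if_neg hk]
      rw [ih (stepN k rtr mc kv) (fun kv' hkv' u hu => by rw [hstep]; exact h kv' (by simp [hkv']) u hu), hstep]

lemma getD_of_lt (l : List String) {i : Nat} (h : i < l.length) : l.getD i "" = l[i] := by
  rw [List.getD_eq_getElem?_getD, List.getElem?_eq_getElem h]
  rfl

lemma map_getD_range (l : List String) :
    (List.range l.length).map (fun i => l.getD i "") = l := by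
  apply List.ext_getElem (by simp)
  intro i h1 h2
  simp only [List.getElem_map, List.getElem_range]
  exact getD_of_lt l h2

lemma map_getD_range_comp (l : List String) (F : String → Int) :
    (List.range l.length).map (fun i => F (l.getD i "")) = l.map F := by
  conv_rhs => rw [← map_getD_range l]
  rw [List.map_map]
  rfl

lemma countP_getD_range (l : List String) (p : String → Bool) :
    (List.range l.length).countP (fun i => p (l.getD i "")) = l.countP p := by
  conv_rhs => rw [← map_getD_range l]
  rw [List.countP_map]
  rfl

lemma index?_getD_self {l : List String} (h : l.Nodup) {i : Nat} (hi : i < l.length) :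
    PySem.List.index? l (l.getD i "") = some i := by
  have hg : l.getD i "" = l[i] := getD_of_lt l hi
  have hmem : l.getD i "" ∈ l := by rw [hg]; exact List.getElem_mem hi
  obtain ⟨j, hj⟩ := Option.isSome_iff_exists.mp ((PySem.List.index?_isSome_iff l _).mpr hmem)
  obtain ⟨hjl, hje, _⟩ := PySem.List.getElem_of_index?_eq_some hj
  rw [hg] at hje
  have : j = i := (List.Nodup.getElem_inj_iff h).mp hje
  rw [hj, this]

lemma pairs_mem {id_list report : List String}
    (hs : ∀ r ∈ report, Shape id_list r) {i j : Nat}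
    (hi : i < (PySem.List.dedup id_list).length) (hj : j < (PySem.List.dedup id_list).length) :
    ((report.map (pairF (PySem.List.dedup id_list))).contains (i, j))
      = decide ([(PySem.List.dedup id_list).getD i "", (PySem.List.dedup id_list).getD j ""] ∈ report.map pvSplit) := by
  rw [show ∀ (L : List (Nat × Nat)) (x : Nat × Nat), L.contains x = decide (x ∈ L) from
    fun L x => by simp, decide_eq_decide]
  constructor
  · intro hm
    obtain ⟨r, hr, hrp⟩ := List.mem_map.mp hm
    obtain ⟨u, v, huv, hu, hv⟩ := hs r hr
    have hu' : u ∈ PySem.List.dedup id_list := (PySem.List.mem_dedup _ _).mpr hu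
    have hv' : v ∈ PySem.List.dedup id_list := (PySem.List.mem_dedup _ _).mpr hv
    obtain ⟨iu, hiu⟩ := Option.isSome_iff_exists.mp ((PySem.List.index?_isSome_iff _ _).mpr hu')
    obtain ⟨iv, hiv⟩ := Option.isSome_iff_exists.mp ((PySem.List.index?_isSome_iff _ _).mpr hv')
    have h0 : (pvSplit r).getD 0 "" = u := by rw [huv]; simp
    have h1 : (pvSplit r).getD 1 "" = v := by rw [huv]; simp
    have hpf : pairF (PySem.List.dedup id_list) r = (iu, iv) := by
      unfold pairF
      rw [h0, h1, hiu, hiv]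
      rfl
    rw [hpf] at hrp
    obtain ⟨rfl, rfl⟩ : iu = i ∧ iv = j := by
      exact ⟨congrArg Prod.fst hrp, congrArg Prod.snd hrp⟩
    obtain ⟨hul, hue, _⟩ := PySem.List.getElem_of_index?_eq_some hiu
    obtain ⟨hvl, hve, _⟩ := PySem.List.getElem_of_index?_eq_some hiv
    have hgu : (PySem.List.dedup id_list).getD iu "" = u := by
      rw [getD_of_lt _ hul, hue]
    have hgv : (PySem.List.dedup id_list).getD iv "" = v := by
      rw [getD_of_lt _ hvl, hve]
    rw [hgu, hgv, ← huv]
    exact List.mem_map_of_mem hr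
  · intro hm
    obtain ⟨r, hr, hrp⟩ := List.mem_map.mp hm
    have hnd := PySem.List.nodup_dedup id_list
    have h0 : (pvSplit r).getD 0 "" = (PySem.List.dedup id_list).getD i "" := by rw [hrp]; simp
    have h1 : (pvSplit r).getD 1 "" = (PySem.List.dedup id_list).getD j "" := by rw [hrp]; simp
    have hpf : pairF (PySem.List.dedup id_list) r = (i, j) := by
      unfold pairF
      rw [h0, h1, index?_getD_self hnd hi, index?_getD_self hnd hj]
      rfl
    rw [← hpf]
    exact List.mem_map_of_mem hr

lemma reporters_count {id_list report : List String}
    (hs : ∀ r ∈ report, Shape id_list r) (v : String) :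
    ((PySem.List.dedup id_list).countP
        (fun w => decide ([w, v] ∈ report.map pvSplit))) = scr report v := by
  unfold scr
  rw [List.countP_eq_length_filter, List.countP_eq_length_filter]
  rw [← List.toFinset_card_of_nodup ((PySem.List.nodup_dedup id_list).filter _),
      ← List.toFinset_card_of_nodup ((PySem.Set.nodup_ofList (report.map pvSplit)).filter _)]
  apply Finset.card_bij (fun w _ => [w, v])
  · intro w hw
    simp only [List.mem_toFinset, List.mem_filter] at hw ⊢
    obtain ⟨hwd, hp⟩ := hw
    rw [decide_eq_true_eq] at hp
    refine ⟨(PySem.Set.mem_ofList _ _).mpr hp, by simp⟩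
  · intro w1 h1 w2 h2 he
    simpa using he
  · intro p hp
    simp only [List.mem_toFinset, List.mem_filter] at hp
    obtain ⟨hpQ, hcond⟩ := hp
    have hpL : p ∈ report.map pvSplit := (PySem.Set.mem_ofList _ _).mp hpQ
    obtain ⟨r, hr, hrp⟩ := List.mem_map.mp hpL
    obtain ⟨a, c, hac, ha, hc⟩ := hs r hr
    subst hrp
    rw [hac] at hcond hpL ⊢
    have hcv : c = v := by simpa using hcond
    subst hcv
    refine ⟨a, ?_, rfl⟩
    simp only [List.mem_toFinset, List.mem_filter]
    exact ⟨(PySem.List.mem_dedup _ _).mpr ha, by simpa using hpL⟩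

lemma loopA_inv {id_list : List String} : ∀ (rep done : List String) (st : StA),
    (∀ r ∈ rep, Shape id_list r) → InvA id_list done st →
    InvA id_list (done ++ rep) (rep.foldl stepA st) := by
  intro rep
  induction rep with
  | nil => intro done st _ h; simpa using h
  | cons a t ih =>
      intro done st hs h
      have := ih (done ++ [a]) (stepA st a) (fun r hr => hs r (by simp [hr]))
        (stepA_inv (hs a (by simp)) h)
      simpa using this

lemma mc0_keys (id_list : List String) :
    ((id_list.foldl (fun d u => d.insert u (0 : Int)) PySem.Dict.empty).keys) = PySem.List.dedup id_list :=
  keys_foldl_insert_const id_list 0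

lemma solution_eq {id_list report : List String} {k : Int}
    (hs : ∀ r ∈ report, Shape id_list r) :
    solution id_list report k = (PySem.List.dedup id_list).map
      (fun u => (((PySem.List.dedup id_list).countP
        (fun v => decide ([u, v] ∈ report.map pvSplit)
          && decide (k ≤ (scr report v : Int)))) : Int)) := by
  have hinv0 : InvA id_list []
      (id_list.foldl (fun d u => d.insert u (PySem.Dict.empty : PySem.Dict String Int)) PySem.Dict.empty,
       id_list.foldl (fun d u => d.insert u (0 : Int)) PySem.Dict.empty,
       PySem.Dict.empty) := by
    refine ⟨?_, ?_, ?_, ?_⟩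
    · intro u v
      rw [show ((id_list.foldl (fun d u => d.insert u (PySem.Dict.empty : PySem.Dict String Int)) PySem.Dict.empty).getD u PySem.Dict.empty) = PySem.Dict.empty from
        getD_foldl_insert_const id_list PySem.Dict.empty PySem.Dict.empty (fun x => PySem.Dict.getD_empty x _) u]
      simp [PySem.Dict.getD_empty]
    · intro v
      rw [getD_foldl_insert_const id_list (0 : Int) PySem.Dict.empty (fun x => PySem.Dict.getD_empty x _) v]
      simp [scr]
    · exact keys_foldl_insert_const id_list 0
    · intro v
      simp [PySem.Dict.getD_empty]
  have hinv := loopA_inv report [] _ hs hinv0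
  rw [List.nil_append] at hinv
  obtain ⟨i1, i2, i3, i4⟩ := hinv
  have hknd : (report.foldl stepA
      (id_list.foldl (fun d u => d.insert u (PySem.Dict.empty : PySem.Dict String Int)) PySem.Dict.empty,
       id_list.foldl (fun d u => d.insert u (0 : Int)) PySem.Dict.empty,
       PySem.Dict.empty)).2.1.keys.Nodup := by
    rw [i3]; exact PySem.List.nodup_dedup _
  have hitems : (report.foldl stepA
      (id_list.foldl (fun d u => d.insert u (PySem.Dict.empty : PySem.Dict String Int)) PySem.Dict.empty,
       id_list.foldl (fun d u => d.insert u (0 : Int)) PySem.Dict.empty,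
       PySem.Dict.empty)).2.1.items
      = (PySem.List.dedup id_list).map (fun v => (v, (scr report v : Int))) := by
    rw [PySem.Dict.items_eq_map_keys _ hknd 0, i3]
    exact List.map_congr_left (fun v _ => by rw [i2 v])
  have hmemid : ∀ (u v : String), [u, v] ∈ report.map pvSplit → u ∈ id_list ∧ v ∈ id_list := by
    intro u v hm
    obtain ⟨r, hr, hrp⟩ := List.mem_map.mp hm
    obtain ⟨a, c, hac, ha, hc⟩ := hs r hr
    rw [hac] at hrp
    obtain ⟨rfl, rfl⟩ : a = u ∧ c = v := by simpa using hrp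
    exact ⟨ha, hc⟩
  simp only [solution]
  set stF := report.foldl stepA
      (id_list.foldl (fun d u => d.insert u (PySem.Dict.empty : PySem.Dict String Int)) PySem.Dict.empty,
       id_list.foldl (fun d u => d.insert u (0 : Int)) PySem.Dict.empty,
       PySem.Dict.empty) with hstF
  have hkeysmc : (stF.2.1.items.foldl (stepN k stF.2.2)
      (id_list.foldl (fun d u => d.insert u (0 : Int)) PySem.Dict.empty)).keys = PySem.List.dedup id_list := by
    rw [loopN_keys k stF.2.2 _ _ ?_, mc0_keys]
    intro kv hkv u hu
    have := ((i4 kv.1).2 u).mp hu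
    rw [mc0_keys]
    exact (PySem.List.mem_dedup _ _).mpr (hmemid u kv.1 this).1
  rw [PySem.Dict.values_eq_map_keys _ (by rw [hkeysmc]; exact PySem.List.nodup_dedup _) 0, hkeysmc]
  apply List.map_congr_left
  intro u hu
  rw [loopN_getD, getD_foldl_insert_const id_list (0 : Int) PySem.Dict.empty (fun x => PySem.Dict.getD_empty x _) u]
  rw [hitems, List.filter_map, List.map_map]
  have hfeq : ((fun kv : String × Int => decide (k ≤ kv.2)) ∘ (fun v => (v, (scr report v : Int))))
      = fun v => decide (k ≤ (scr report v : Int)) := rfl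
  rw [hfeq]
  have hterm : ∀ v ∈ (PySem.List.dedup id_list).filter (fun v => decide (k ≤ (scr report v : Int))),
      ((fun kv : String × Int => (((stF.2.2.getD kv.1 PySem.Set.empty).count u : Nat) : Int))
        ∘ (fun v => (v, (scr report v : Int)))) v
      = (fun v => if decide ([u, v] ∈ report.map pvSplit) = true then (1 : Int) else 0) v := by
    intro v _
    simp only [Function.comp]
    by_cases hm : [u, v] ∈ report.map pvSplit
    · rw [List.count_eq_one_of_mem (i4 v).1 (((i4 v).2 u).mpr hm)]
      simp [hm]
    · rw [List.count_eq_zero_of_not_mem (fun hh => hm (((i4 v).2 u).mp hh))]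
      simp [hm]
  rw [List.map_congr_left hterm, PySem.List.sum_map_ite_one_zero, List.countP_filter]
  simp

lemma alt_eq {id_list report : List String} {k : Int}
    (hs : ∀ r ∈ report, Shape id_list r) :
    solution_alt id_list report k = (PySem.List.dedup id_list).map
      (fun u => (((PySem.List.dedup id_list).countP
        (fun v => decide ([u, v] ∈ report.map pvSplit)
          && decide (k ≤ (scr report v : Int)))) : Int)) := by
  simp only [solution_alt]
  rw [← map_getD_range_comp (PySem.List.dedup id_list)]
  apply List.map_congr_left
  intro i hi
  have hi' : i < (PySem.List.dedup id_list).length := List.mem_range.mp hi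
  congr 1
  rw [List.countP_filter,
      ← countP_getD_range (PySem.List.dedup id_list)
        (fun v => decide ([(PySem.List.dedup id_list).getD i "", v] ∈ report.map pvSplit)
          && decide (k ≤ (scr report v : Int)))]
  apply List.countP_congr
  intro j hj
  have hj' : j < (PySem.List.dedup id_list).length := List.mem_range.mp hj
  have hinner : ((List.range (PySem.List.dedup id_list).length).countP
      (fun i' => (report.map (pairF (PySem.List.dedup id_list))).contains (i', j)))
      = scr report ((PySem.List.dedup id_list).getD j "") := by
    rw [← reporters_count hs ((PySem.List.dedup id_list).getD j ""),
        ← countP_getD_range (PySem.List.dedup id_list)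
          (fun w => decide ([w, (PySem.List.dedup id_list).getD j ""] ∈ report.map pvSplit))]
    apply List.countP_congr
    intro i' hi''
    rw [pairs_mem hs (List.mem_range.mp hi'') hj']
  rw [pairs_mem hs hi' hj', hinner]

-- ===== VERDICT (by name: the statement is the Claim_ definition above) =====
theorem solution_spec : Claim_equal_solution := by
  intro id_list report k _ hpre
  unfold Spec_solution
  rw [solution_eq (pre_shape hpre), alt_eq (pre_shape hpre)]
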